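-- pv_equiv track=rewrite | github.com/baladon-lucas-pardinas/SyntaxGrammar-es-gn | spanish/freeling-dict-scripts/noun-inflect.py | match_nouns
-- ===== SOURCE A (Python) =====
-- def match_nouns(bilingual, spanish_nouns):
--     matched = []
--     unmatched = []
--     for bi_row in bilingual:
--         found = False
--         if bi_row[0] == 'n':
--             for noun_row in spanish_nouns:
--                 if noun_row[1] == bi_row[2] or noun_row[0] == bi_row[2]:
--                     matched.append([bi_row[1]] + noun_row[:-3])
--                     found = True
--             if not found:
--                 unmatched.append(bi_row)
--     return (matched, unmatched)
-- ===== SOURCE B (Python) =====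
-- def match_nouns(bilingual, spanish_nouns):
--     # hash index: noun value (col0/col1, deduped) -> matching noun entries in order
--     index = {}
--     for noun_row in spanish_nouns:
--         entry = noun_row[:-3]
--         for key in dict.fromkeys(noun_row[:2]):
--             index.setdefault(key, []).append(entry)
--     matched = []
--     unmatched = []
--     for bi_row in bilingual:
--         if bi_row[0] == 'n':
--             entries = index.get(bi_row[2], [])
--             if entries:
--                 for entry in entries:
--                     matched.append([bi_row[1]] + entry)
--             else:
--                 unmatched.append(bi_row)
--     return (matched, unmatched)
-- ===== Notes on version B (the rewrite author's own statement) =====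
-- stated objective: alternative
-- what changed: replaces the per-bilingual-row linear scan of spanish_nouns by a dict index built once from each noun row's first two (deduped) columns to its trimmed entry, so each bilingual row does a single lookup instead of an inner scan
-- outside the precondition, e.g. on match_nouns([['n']], []): A returns ([], [['n']]), B raises IndexError
import Mathlib
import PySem

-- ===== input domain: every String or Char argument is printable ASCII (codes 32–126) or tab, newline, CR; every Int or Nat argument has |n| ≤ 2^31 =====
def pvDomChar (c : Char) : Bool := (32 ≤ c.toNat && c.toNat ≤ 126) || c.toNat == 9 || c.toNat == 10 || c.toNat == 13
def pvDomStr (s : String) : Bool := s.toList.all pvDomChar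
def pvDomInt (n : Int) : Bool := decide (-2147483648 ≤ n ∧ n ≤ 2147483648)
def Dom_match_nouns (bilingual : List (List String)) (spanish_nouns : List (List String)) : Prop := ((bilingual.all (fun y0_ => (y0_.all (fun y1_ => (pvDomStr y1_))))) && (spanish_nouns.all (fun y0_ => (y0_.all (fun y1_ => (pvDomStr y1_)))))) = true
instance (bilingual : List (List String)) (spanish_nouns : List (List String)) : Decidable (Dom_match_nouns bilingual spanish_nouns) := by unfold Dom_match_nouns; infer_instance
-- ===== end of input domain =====

-- ===== PORT A =====
def match_nouns (bilingual : List (List String)) (spanish_nouns : List (List String)) : List (List String) × List (List String) :=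
  bilingual.foldl (fun st bi_row =>
    if PySem.List.pyGetD bi_row 0 "" = "n" then
      let r := spanish_nouns.foldl (fun (p : List (List String) × Bool) noun_row =>
        if PySem.List.pyGetD noun_row 1 "" = PySem.List.pyGetD bi_row 2 "" ∨
           PySem.List.pyGetD noun_row 0 "" = PySem.List.pyGetD bi_row 2 "" then
          (p.1 ++ [PySem.List.pyGetD bi_row 1 "" :: PySem.List.slice noun_row none (some (-3))], true)
        else p) (st.1, false)
      if r.2 then (r.1, st.2) else (r.1, st.2 ++ [bi_row])
    else st) ([], [])

-- ===== PORT B =====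
-- B builds a hash index once: each noun row's deduped first two columns map to its trimmed entry.
def match_nouns_alt (bilingual : List (List String)) (spanish_nouns : List (List String)) : List (List String) × List (List String) :=
  let index : PySem.Dict String (List (List String)) :=
    spanish_nouns.foldl (fun d noun_row =>
      let entry := PySem.List.slice noun_row none (some (-3))
      (PySem.List.dedup (PySem.List.slice noun_row (some 0) (some 2))).foldl
        (fun d key => d.modify key [] (· ++ [entry])) d) PySem.Dict.empty
  bilingual.foldl (fun st bi_row =>
    if PySem.List.pyGetD bi_row 0 "" = "n" then
      let es := index.getD (PySem.List.pyGetD bi_row 2 "") []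
      if es = [] then (st.1, st.2 ++ [bi_row])
      else (st.1 ++ es.map (fun e => PySem.List.pyGetD bi_row 1 "" :: e), st.2)
    else st) ([], [])

-- ===== PRECONDITION & SPEC =====
-- Pre_ excludes inputs on which A raises IndexError (an empty bilingual row; an 'n'-tagged
-- bilingual row shorter than 3 or a spanish row shorter than 2 while an 'n' row exists and
-- spanish_nouns is nonempty); it additionally excludes 'n'-tagged bilingual rows shorter than
-- 3 fields when spanish_nouns is empty, where A only returns by accident of the empty inner
-- loop while B's lookup of the missing third field raises.
def Pre_match_nouns (bilingual : List (List String)) (spanish_nouns : List (List String)) : Prop :=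
  (∀ r ∈ bilingual, r ≠ []) ∧
  (∀ r ∈ bilingual, PySem.List.pyGetD r 0 "" = "n" → 3 ≤ r.length) ∧
  ((∃ r ∈ bilingual, PySem.List.pyGetD r 0 "" = "n") → ∀ s ∈ spanish_nouns, 2 ≤ s.length)
instance (bilingual : List (List String)) (spanish_nouns : List (List String)) : Decidable (Pre_match_nouns bilingual spanish_nouns) := by unfold Pre_match_nouns; infer_instance
def pvWitness_match_nouns : List (List String) × List (List String) :=
  ([["n", "jagua", "perro"]], [["perro", "perro", "NCMS000", "a", "Ns", "0"]])
def Spec_match_nouns (bilingual : List (List String)) (spanish_nouns : List (List String)) (out : List (List String) × List (List String)) : Prop := out = match_nouns_alt bilingual spanish_nouns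
instance (bilingual : List (List String)) (spanish_nouns : List (List String)) (out : List (List String) × List (List String)) : Decidable (Spec_match_nouns bilingual spanish_nouns out) := by unfold Spec_match_nouns; infer_instance

-- ===== CLAIM (what is proved, stated in full; the proofs are below) =====
def Claim_equal_match_nouns : Prop := ∀ (bilingual : List (List String)) (spanish_nouns : List (List String)), Dom_match_nouns bilingual spanish_nouns → Pre_match_nouns bilingual spanish_nouns → Spec_match_nouns bilingual spanish_nouns (match_nouns bilingual spanish_nouns)

-- ===== LEMMAS AND PROOFS =====

-- A's inner scan over spanish_nouns, characterised as a filter.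
theorem innerA_eq (key v : String) (sp : List (List String)) (m0 : List (List String)) (b0 : Bool) :
    sp.foldl (fun (p : List (List String) × Bool) noun_row =>
        if PySem.List.pyGetD noun_row 1 "" = key ∨ PySem.List.pyGetD noun_row 0 "" = key then
          (p.1 ++ [v :: PySem.List.slice noun_row none (some (-3))], true)
        else p) (m0, b0)
    = (m0 ++ (sp.filter (fun s => PySem.List.pyGetD s 1 "" == key || PySem.List.pyGetD s 0 "" == key)).map
          (fun s => v :: PySem.List.slice s none (some (-3))),
       b0 || sp.any (fun s => PySem.List.pyGetD s 1 "" == key || PySem.List.pyGetD s 0 "" == key)) := by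
  induction sp generalizing m0 b0 with
  | nil => simp
  | cons s sp ih =>
    by_cases h : PySem.List.pyGetD s 1 "" = key ∨ PySem.List.pyGetD s 0 "" = key
    · have hb : (PySem.List.pyGetD s 1 "" == key || PySem.List.pyGetD s 0 "" == key) = true := by
        rcases h with h | h <;> simp [h]
      simp [List.foldl_cons, if_pos h, ih, hb]
    · have hb : (PySem.List.pyGetD s 1 "" == key || PySem.List.pyGetD s 0 "" == key) = false := by
        rcases not_or.mp h with ⟨h1, h2⟩; simp [h1, h2]
      simp [List.foldl_cons, if_neg h, ih, hb]

-- B's nested index-building loop is a fold over the flattened (key, entry) pair list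
theorem nested_foldl_eq (sp : List (List String)) (d : PySem.Dict String (List (List String))) :
    sp.foldl (fun d noun_row =>
        (PySem.List.dedup (PySem.List.slice noun_row (some 0) (some 2))).foldl
          (fun d key => d.modify key [] (· ++ [PySem.List.slice noun_row none (some (-3))])) d) d
    = (sp.flatMap (fun s => (PySem.List.dedup (PySem.List.slice s (some 0) (some 2))).map
          (fun key => (key, PySem.List.slice s none (some (-3)))))).foldl
        (fun d p => d.modify p.1 [] (· ++ [p.2])) d := by
  induction sp generalizing d with
  | nil => rfl
  | cons s sp ih =>
    simp only [List.foldl_cons, List.flatMap_cons, List.foldl_append, List.foldl_map]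
    exact ih _

theorem flatMap_if_singleton {α β : Type} (l : List α) (p : α → Bool) (f : α → β) :
    (l.flatMap (fun a => if p a then [f a] else [])) = (l.filter p).map f := by
  induction l with
  | nil => rfl
  | cons a l ih =>
    by_cases h : p a <;> simp [List.flatMap_cons, h, ih]

-- per-noun-row: filtering the produced (key, entry) pairs keeps one pair iff the row matches
theorem row_pairs_filter {γ : Type} (s : List String) (hs : 2 ≤ s.length) (k : String) (e : γ) :
    ((((PySem.List.dedup (PySem.List.slice s (some 0) (some 2))).map (fun key => (key, e))).filter
        (fun p => p.1 == k)).map Prod.snd)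
    = (if PySem.List.pyGetD s 1 "" == k || PySem.List.pyGetD s 0 "" == k then [e] else []) := by
  match s, hs with
  | a :: b :: t, _ =>
    have hsl : PySem.List.slice (a :: b :: t) (some 0) (some 2) = [a, b] := by
      rw [PySem.List.slice_zero_start, PySem.List.slice_to _ (by norm_num)]
      rfl
    rw [hsl, PySem.List.dedup_eq_ofList]
    by_cases hab : a = b
    · subst hab
      by_cases hak : a = k <;>
        simp [PySem.Set.ofList, PySem.Set.add, PySem.Set.empty, PySem.Set.contains, hak,
          PySem.List.pyGetD_ofNat', PySem.List.pyGetD_zero_cons]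
    · by_cases hak : a = k
      · by_cases hbk : b = k
        · exact absurd (hak.trans hbk.symm) hab
        · simp [PySem.Set.ofList, PySem.Set.add, PySem.Set.empty, PySem.Set.contains, hak, hbk,
            Ne.symm hab, Ne.symm hbk, PySem.List.pyGetD_ofNat', PySem.List.pyGetD_zero_cons]
      · by_cases hbk : b = k
        · simp [PySem.Set.ofList, PySem.Set.add, PySem.Set.empty, PySem.Set.contains, hak, hbk,
            Ne.symm hab, Ne.symm hak, PySem.List.pyGetD_ofNat', PySem.List.pyGetD_zero_cons]
        · simp [PySem.Set.ofList, PySem.Set.add, PySem.Set.empty, PySem.Set.contains, hak, hbk,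
            Ne.symm hab, Ne.symm hak, Ne.symm hbk, PySem.List.pyGetD_ofNat', PySem.List.pyGetD_zero_cons]

-- the index built by B, characterised: getD k [] lists the trimmed entries of matching rows in order
theorem index_getD (sp : List (List String)) (hsp : ∀ s ∈ sp, 2 ≤ s.length) (k : String) :
    (sp.foldl (fun d noun_row =>
        (PySem.List.dedup (PySem.List.slice noun_row (some 0) (some 2))).foldl
          (fun d key => d.modify key [] (· ++ [PySem.List.slice noun_row none (some (-3))])) d)
      (PySem.Dict.empty : PySem.Dict String (List (List String)))).getD k []
    = (sp.filter (fun s => PySem.List.pyGetD s 1 "" == k || PySem.List.pyGetD s 0 "" == k)).map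
        (fun s => PySem.List.slice s none (some (-3))) := by
  rw [nested_foldl_eq, PySem.Dict.getD_foldl_modify_append, PySem.Dict.getD_empty]
  rw [List.filter_flatMap, List.nil_append, List.map_flatMap]
  rw [List.flatMap_congr (g := fun s => if PySem.List.pyGetD s 1 "" == k || PySem.List.pyGetD s 0 "" == k
        then [PySem.List.slice s none (some (-3))] else [])
      (fun s hs => row_pairs_filter s (hsp s hs) k _)]
  exact flatMap_if_singleton sp _ _

-- ===== VERDICT (by name: the statement is the Claim_ definition above) =====
theorem match_nouns_spec : Claim_equal_match_nouns := by
  intro bilingual spanish_nouns _ hpre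
  unfold Spec_match_nouns match_nouns match_nouns_alt
  apply PySem.List.foldl_congr_mem
  intro acc r hr
  by_cases htag : PySem.List.pyGetD r 0 "" = "n"
  · have hsp : ∀ s ∈ spanish_nouns, 2 ≤ s.length := hpre.2.2 ⟨r, hr, htag⟩
    simp only [htag, if_true]
    rw [innerA_eq, index_getD spanish_nouns hsp]
    set k := PySem.List.pyGetD r 2 ""
    set F := spanish_nouns.filter (fun s => PySem.List.pyGetD s 1 "" == k || PySem.List.pyGetD s 0 "" == k) with hF
    have hany : spanish_nouns.any (fun s => PySem.List.pyGetD s 1 "" == k || PySem.List.pyGetD s 0 "" == k)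
        = !F.isEmpty := by
      rw [hF]
      cases hres : spanish_nouns.any (fun s => PySem.List.pyGetD s 1 "" == k || PySem.List.pyGetD s 0 "" == k) with
      | false =>
        have hnil : spanish_nouns.filter (fun s => PySem.List.pyGetD s 1 "" == k || PySem.List.pyGetD s 0 "" == k) = [] := by
          rw [List.filter_eq_nil_iff]
          intro a ha
          exact List.any_eq_false.mp hres a ha
        simp [hnil]
      | true =>
        obtain ⟨x, hx, hpx⟩ := List.any_eq_true.mp hres
        have hne : spanish_nouns.filter (fun s => PySem.List.pyGetD s 1 "" == k || PySem.List.pyGetD s 0 "" == k) ≠ [] := by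
          intro h0
          exact absurd hpx (by simpa using List.filter_eq_nil_iff.mp h0 x hx)
        simp [List.isEmpty_iff, hne]
    rw [hany]
    cases hFe : F.isEmpty
    · have hmm : F.map (fun s => PySem.List.pyGetD r 1 "" :: PySem.List.slice s none (some (-3)))
          = (F.map (fun s => PySem.List.slice s none (some (-3)))).map
          (fun e => PySem.List.pyGetD r 1 "" :: e) := by
        rw [List.map_map]; rfl
      have hne : F.map (fun s => PySem.List.slice s none (some (-3))) ≠ [] := by
        have : F ≠ [] := by simpa [List.isEmpty_iff] using (by simp [hFe] : ¬ F.isEmpty = true)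
        simp [this]
      simp only [Bool.not_false, Bool.or_true, if_true, if_neg hne]
      rw [hmm]
    · have : F = [] := List.isEmpty_iff.mp hFe
      simp [this]
  · simp [htag]
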